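-- pv_equiv track=rewrite | github.com/NakulK48/aoc-2020 | 18b.py | evaluate
-- ===== SOURCE A (Python) =====
-- from enum import Enum
-- from collections import deque
--
-- class Operation(Enum):
--     ADD = 0
--     MULT = 1
--
-- def update(old_result, new_number, operation):
--     if operation == Operation.ADD:
--         return old_result + new_number
--     if operation == Operation.MULT:
--         return old_result * new_number
--     raise ValueError(f"Invalid operation {operation}")
--
-- def evaluate(statement, start_pos=0):
--     position = start_pos
--     result = 0
--     operation = Operation.ADD
--     stack = deque()
--     while position < len(statement):
--         current = statement[position]
--         if current == ")":
--             while stack: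
--                 result *= stack.pop()
--             return (result, position + 1)
--         elif current == "(":
--             inner_result, position = evaluate(statement, position + 1)
--             result = update(result, inner_result, operation)
--             continue
--         if current == "*":
--             stack.append(result)
--             result = 0
--             operation = Operation.ADD
--
--         elif current == "+":
--             operation = Operation.ADD
--         else:
--             number = int(current)
--             result = update(result, number, operation)
--
--         position += 1
--
--     while stack:
--         result *= stack.pop()
--     return result, len(statement)
-- ===== SOURCE B (Python) =====
-- def evaluate(statement, start_pos=0):
--     # Iterative stack machine: recursion replaced by an explicit frame stack,
--     # and the deferred multiply-stack replaced by a running product.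
--     pos = start_pos
--     total = 0     # current sum (add-precedence level)
--     prod = 1      # running product of completed sums at this level
--     frames = []   # saved (total, prod) for each open '('
--     n = len(statement)
--     while pos < n:
--         ch = statement[pos]
--         if ch == ")":
--             value = prod * total
--             if not frames:
--                 return (value, pos + 1)
--             total, prod = frames.pop()
--             total += value
--         elif ch == "(":
--             frames.append((total, prod))
--             total, prod = 0, 1
--         elif ch == "*":
--             prod *= total
--             total = 0
--         elif ch == "+":
--             pass
--         else:
--             total += int(ch)
--         pos += 1
--     while frames:
--         value = prod * total
--         total, prod = frames.pop()
--         total += value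
--     return prod * total, n
-- ===== Notes on version B (the rewrite author's own statement) =====
-- stated objective: alternative
-- what changed: A's recursive evaluator with a deferred deque of multiply operands is replaced by a single iterative loop: recursion becomes an explicit stack of saved (sum, product) frames and the deque of factors becomes a running product.
import Mathlib
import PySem

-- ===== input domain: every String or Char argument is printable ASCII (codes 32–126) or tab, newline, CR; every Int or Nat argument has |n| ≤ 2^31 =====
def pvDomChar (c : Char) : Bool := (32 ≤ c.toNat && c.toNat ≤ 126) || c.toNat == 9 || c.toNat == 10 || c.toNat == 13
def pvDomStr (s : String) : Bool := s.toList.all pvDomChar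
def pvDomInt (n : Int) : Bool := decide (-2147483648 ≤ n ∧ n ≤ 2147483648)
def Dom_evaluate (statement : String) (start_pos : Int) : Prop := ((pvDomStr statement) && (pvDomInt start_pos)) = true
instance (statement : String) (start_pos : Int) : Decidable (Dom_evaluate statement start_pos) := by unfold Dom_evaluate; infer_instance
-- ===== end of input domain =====

-- B replaces A's recursion by an explicit frame stack and A's deferred multiply-deque
-- by a running product; same values, same cost (objective: alternative).


-- ===== PORT A =====
inductive Operation where
  | ADD : Operation
  | MULT : Operation
deriving DecidableEq, Repr

-- update(old_result, new_number, operation)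
def updateOp (old_result new_number : Int) (operation : Operation) : Int :=
  match operation with
  | .ADD => old_result + new_number
  | .MULT => old_result * new_number

-- `while stack: result *= stack.pop()`  (pop from the right end)
def drainA (result : Int) (stack : List Int) : Int :=
  List.foldl (· * ·) result stack.reverse

-- A's while-loop / recursion, fueled (fuel only makes the recursion structural; it
-- is large enough for every terminating run, see lemma evalAgo_of_EvN below).
def evalAgo (cs : List Char) (fuel : Nat) (position result : Int)
    (operation : Operation) (stack : List Int) : Option (Int × Int) :=
  match fuel with
  | 0 => none
  | fuel + 1 =>
    if position < (cs.length : Int) then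
      match PySem.List.pyGet? cs position with
      | none => none  -- IndexError
      | some current =>
        if current = ')' then some (drainA result stack, position + 1)
        else if current = '(' then
          match evalAgo cs fuel (position + 1) 0 .ADD [] with
          | none => none
          | some (inner_result, position') =>
            evalAgo cs fuel position' (updateOp result inner_result operation) operation stack
        else if current = '*' then evalAgo cs fuel (position + 1) 0 .ADD (stack ++ [result])
        else if current = '+' then evalAgo cs fuel (position + 1) result .ADD stack
        else
          match PySem.Int.ofStr? (String.mk [current]) with
          | none => none  -- ValueError from int(current)
          | some number =>
            evalAgo cs fuel (position + 1) (updateOp result number operation) operation stack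
    else some (drainA result stack, (cs.length : Int))

def evaluate (statement : String) (start_pos : Int) : Int × Int :=
  let cs := statement.toList
  (evalAgo cs (((cs.length : Int) - start_pos).toNat + 1) start_pos 0 .ADD []).getD (0, 0)

-- ===== PORT B =====
-- single iterative loop; frames saves (total, prod) per open '('
-- (fuel only makes the loop structural; 2*(len-pos)+|frames|+1 steps always suffice,
-- see lemma loopB_of_evN below)
def loopB (cs : List Char) (fuel : Nat) (pos total prod : Int) (frames : List (Int × Int)) :
    Option (Int × Int) :=
  match fuel with
  | 0 => none
  | fuel + 1 =>
    if pos < (cs.length : Int) then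
      match PySem.List.pyGet? cs pos with
      | none => none  -- IndexError
      | some ch =>
        if ch = ')' then
          match frames with
          | [] => some (prod * total, pos + 1)
          | (t0, p0) :: fs => loopB cs fuel (pos + 1) (t0 + prod * total) p0 fs
        else if ch = '(' then loopB cs fuel (pos + 1) 0 1 ((total, prod) :: frames)
        else if ch = '*' then loopB cs fuel (pos + 1) 0 (prod * total) frames
        else if ch = '+' then loopB cs fuel (pos + 1) total prod frames
        else
          match PySem.Int.ofStr? (String.mk [ch]) with
          | none => none  -- ValueError from int(ch)
          | some d => loopB cs fuel (pos + 1) (total + d) prod frames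
    else
      match frames with
      | [] => some (prod * total, (cs.length : Int))
      | (t0, p0) :: fs => loopB cs fuel pos (t0 + prod * total) p0 fs

def evaluate_alt (statement : String) (start_pos : Int) : Int × Int :=
  let cs := statement.toList
  (loopB cs (2 * ((cs.length : Int) - start_pos).toNat + 1) start_pos 0 1 []).getD (0, 0)

-- ===== PRECONDITION & SPEC =====
-- scanOkB cs d: walking cs at bracket depth d, every character reached before the
-- first unmatched ')' is a digit or one of + * ( ).  This is exactly "A raises no
-- ValueError/IndexError": A stops at the first unmatched ')' and never looks beyond it.
def scanOkB : List Char → Nat → Bool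
  | [], _ => true
  | c :: cs, d =>
    if c = ')' then (if d = 0 then true else scanOkB cs (d - 1))
    else if c = '(' then scanOkB cs (d + 1)
    else if c = '*' then scanOkB cs d
    else if c = '+' then scanOkB cs d
    else (PySem.Int.ofStr? (String.mk [c])).isSome && scanOkB cs d

-- Pre_: start_pos ≥ -len (else IndexError), and every character A will visit is valid;
-- for negative start_pos Python's negative indexing visits the tail wrap-around first.
def Pre_evaluate (statement : String) (start_pos : Int) : Prop :=
  -((statement.toList.length : Int)) ≤ start_pos ∧
    (if 0 ≤ start_pos then
        scanOkB (statement.toList.drop start_pos.toNat) 0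
      else
        scanOkB (statement.toList.drop ((statement.toList.length : Int) + start_pos).toNat
                  ++ statement.toList) 0) = true

instance (statement : String) (start_pos : Int) : Decidable (Pre_evaluate statement start_pos) := by
  unfold Pre_evaluate; infer_instance

def pvWitness_evaluate : String × Int := ("()", 0)

def Spec_evaluate (statement : String) (start_pos : Int) (out : Int × Int) : Prop := out = evaluate_alt statement start_pos
instance (statement : String) (start_pos : Int) (out : Int × Int) : Decidable (Spec_evaluate statement start_pos out) := by unfold Spec_evaluate; infer_instance

-- ===== CLAIM (what is proved, stated in full; the proofs are below) =====
def Claim_equal_evaluate : Prop := ∀ (statement : String) (start_pos : Int), Dom_evaluate statement start_pos → Pre_evaluate statement start_pos → Spec_evaluate statement start_pos (evaluate statement start_pos)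

-- ===== LEMMAS AND PROOFS =====

theorem loopB_zero (cs : List Char) (pos total prod : Int) (frames : List (Int × Int)) :
    loopB cs 0 pos total prod frames = none := rfl

theorem loopB_succ (cs : List Char) (f : Nat) (pos total prod : Int)
    (frames : List (Int × Int)) :
    loopB cs (f + 1) pos total prod frames =
      (if pos < (cs.length : Int) then
        match PySem.List.pyGet? cs pos with
        | none => none
        | some ch =>
          if ch = ')' then
            match frames with
            | [] => some (prod * total, pos + 1)
            | (t0, p0) :: fs => loopB cs f (pos + 1) (t0 + prod * total) p0 fs
          else if ch = '(' then loopB cs f (pos + 1) 0 1 ((total, prod) :: frames)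
          else if ch = '*' then loopB cs f (pos + 1) 0 (prod * total) frames
          else if ch = '+' then loopB cs f (pos + 1) total prod frames
          else
            match PySem.Int.ofStr? (String.mk [ch]) with
            | none => none
            | some d => loopB cs f (pos + 1) (total + d) prod frames
      else
        match frames with
        | [] => some (prod * total, (cs.length : Int))
        | (t0, p0) :: fs => loopB cs f pos (t0 + prod * total) p0 fs) := rfl

-- sized big-step semantics of one level of A's loop (operation is always ADD in A)
inductive EvN (cs : List Char) : Nat → Int → Int → List Int → Int × Int → Prop where
  | eof {pos r st} : ¬ pos < (cs.length : Int) →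
      EvN cs 1 pos r st (drainA r st, (cs.length : Int))
  | close {pos r st} : pos < (cs.length : Int) →
      PySem.List.pyGet? cs pos = some ')' →
      EvN cs 1 pos r st (drainA r st, pos + 1)
  | paren {pos r st n1 n2 v1 p1 out} : pos < (cs.length : Int) →
      PySem.List.pyGet? cs pos = some '(' →
      EvN cs n1 (pos + 1) 0 [] (v1, p1) →
      EvN cs n2 p1 (r + v1) st out →
      EvN cs (n1 + n2 + 1) pos r st out
  | mul {pos r st n out} : pos < (cs.length : Int) →
      PySem.List.pyGet? cs pos = some '*' →
      EvN cs n (pos + 1) 0 (st ++ [r]) out →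
      EvN cs (n + 1) pos r st out
  | plus {pos r st n out} : pos < (cs.length : Int) →
      PySem.List.pyGet? cs pos = some '+' →
      EvN cs n (pos + 1) r st out →
      EvN cs (n + 1) pos r st out
  | digit {pos r st c d n out} : pos < (cs.length : Int) →
      PySem.List.pyGet? cs pos = some c →
      c ≠ ')' → c ≠ '(' → c ≠ '*' → c ≠ '+' →
      PySem.Int.ofStr? (String.mk [c]) = some d →
      EvN cs n (pos + 1) (r + d) st out →
      EvN cs (n + 1) pos r st out

-- sized resume chain: what B's saved frames mean in terms of A's suspended callers
inductive ResumeNB (cs : List Char) : Nat → List (Int × Int) → Int → Int → Int × Int → Prop where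
  | nil {v p} : ResumeNB cs 0 [] v p (v, p)
  | cons {g m t0 p0 st0 fs v p v' p' out} :
      EvN cs g p (t0 + v) st0 (v', p') →
      st0.prod = p0 →
      ResumeNB cs m fs v' p' out →
      ResumeNB cs (g + m) ((t0, p0) :: fs) v p out

theorem foldl_mul_eq_prod (l : List Int) (r : Int) : List.foldl (· * ·) r l = r * l.prod := by
  induction l generalizing r with
  | nil => simp
  | cons a l ih => simp [List.foldl, ih, List.prod_cons]; ring

theorem drainA_eq_prod (r : Int) (st : List Int) : drainA r st = st.prod * r := by
  rw [drainA, foldl_mul_eq_prod, List.prod_reverse]; ring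

-- L1: a successful run of A's fueled loop yields a sized big-step derivation
theorem evN_of_evalAgo {cs : List Char} :
    ∀ (fuel : Nat) (pos r : Int) (st : List Int) (out : Int × Int),
      evalAgo cs fuel pos r .ADD st = some out → ∃ n, EvN cs n pos r st out := by
  intro fuel
  induction fuel with
  | zero => intro pos r st out h; simp [evalAgo] at h
  | succ f ih =>
    intro pos r st out h
    rw [evalAgo] at h
    split at h
    · -- pos < len
      rename_i hp
      split at h
      · exact absurd h (by simp)
      · rename_i c hg
        split at h
        · -- ')'
          rename_i hc1
          obtain rfl := Option.some.inj h
          exact ⟨1, .close hp (hc1 ▸ hg)⟩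
        · rename_i hc1
          split at h
          · -- '('
            rename_i hc2
            split at h
            · exact absurd h (by simp)
            · rename_i v1 p1 hin
              simp only [updateOp] at h
              obtain ⟨n1, e1⟩ := ih _ _ _ _ hin
              obtain ⟨n2, e2⟩ := ih _ _ _ _ h
              exact ⟨n1 + n2 + 1, .paren hp (hc2 ▸ hg) e1 e2⟩
          · rename_i hc2
            split at h
            · -- '*'
              rename_i hc3
              obtain ⟨n, e⟩ := ih _ _ _ _ h
              exact ⟨n + 1, .mul hp (hc3 ▸ hg) e⟩
            · rename_i hc3
              split at h
              · -- '+'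
                rename_i hc4
                obtain ⟨n, e⟩ := ih _ _ _ _ h
                exact ⟨n + 1, .plus hp (hc4 ▸ hg) e⟩
              · rename_i hc4
                split at h
                · exact absurd h (by simp)
                · rename_i d hd
                  simp only [updateOp] at h
                  obtain ⟨n, e⟩ := ih _ _ _ _ h
                  exact ⟨n + 1, .digit hp hg hc1 hc2 hc3 hc4 hd e⟩
    · -- EOF
      rename_i hp
      obtain rfl := Option.some.inj h
      exact ⟨1, .eof hp⟩

-- L2: end positions of a big-step run lie between pos and len
theorem evN_bounds {cs : List Char} {n : Nat} {pos r : Int} {st : List Int} {out : Int × Int}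
    (h : EvN cs n pos r st out) (hp : pos ≤ (cs.length : Int)) :
    pos ≤ out.2 ∧ out.2 ≤ (cs.length : Int) := by
  induction h with
  | eof h => exact ⟨by omega, by omega⟩
  | close hlt hg => exact ⟨by omega, by omega⟩
  | paren hlt hg e1 e2 ih1 ih2 =>
    have b1 := ih1 (by omega)
    have b2 := ih2 (by omega)
    exact ⟨by omega, by omega⟩
  | mul hlt hg e ih => have b := ih (by omega); exact ⟨by omega, by omega⟩
  | plus hlt hg e ih => have b := ih (by omega); exact ⟨by omega, by omega⟩
  | digit hlt hg h1 h2 h3 h4 hd e ih => have b := ih (by omega); exact ⟨by omega, by omega⟩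

-- L3: a big-step run is reproduced by the fueled loop for every sufficient fuel
theorem evalAgo_of_EvN {cs : List Char} {n : Nat} {pos r : Int} {st : List Int} {out : Int × Int}
    (h : EvN cs n pos r st out) :
    ∀ fuel : Nat, ((cs.length : Int) - pos).toNat + 1 ≤ fuel →
      evalAgo cs fuel pos r .ADD st = some out := by
  induction h with
  | eof h =>
    intro fuel hf
    obtain ⟨f, rfl⟩ : ∃ f, fuel = f + 1 := ⟨fuel - 1, by omega⟩
    rw [evalAgo, if_neg h]
  | close hlt hg =>
    intro fuel hf
    obtain ⟨f, rfl⟩ : ∃ f, fuel = f + 1 := ⟨fuel - 1, by omega⟩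
    simp [evalAgo, hlt, hg]
  | paren hlt hg e1 e2 ih1 ih2 =>
    rename_i pos r st n1 n2 v1 p1 out
    intro fuel hf
    obtain ⟨f, rfl⟩ : ∃ f, fuel = f + 1 := ⟨fuel - 1, by omega⟩
    have hb := evN_bounds e1 (by omega)
    have h1 : evalAgo cs f (pos + 1) 0 .ADD [] = some (v1, p1) := ih1 f (by omega)
    have h2 : evalAgo cs f p1 (r + v1) .ADD st = some out := by
      apply ih2 f
      have : pos + 1 ≤ p1 := hb.1
      omega
    simp [evalAgo, hlt, hg, h1, updateOp, h2]
  | mul hlt hg e ih =>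
    intro fuel hf
    obtain ⟨f, rfl⟩ : ∃ f, fuel = f + 1 := ⟨fuel - 1, by omega⟩
    simp [evalAgo, hlt, hg]
    exact ih f (by omega)
  | plus hlt hg e ih =>
    intro fuel hf
    obtain ⟨f, rfl⟩ : ∃ f, fuel = f + 1 := ⟨fuel - 1, by omega⟩
    simp [evalAgo, hlt, hg]
    exact ih f (by omega)
  | digit hlt hg h1 h2 h3 h4 hd e ih =>
    intro fuel hf
    obtain ⟨f, rfl⟩ : ∃ f, fuel = f + 1 := ⟨fuel - 1, by omega⟩
    simp [evalAgo, hlt, hg, h1, h2, h3, h4, hd, updateOp]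
    exact ih f (by omega)

-- replacing A's multiplier stack by any stack with the same product gives the same run
theorem evN_stack {cs : List Char} {n : Nat} {pos r : Int} {st : List Int} {out : Int × Int}
    (h : EvN cs n pos r st out) :
    ∀ st' : List Int, st'.prod = st.prod → EvN cs n pos r st' out := by
  induction h with
  | eof h =>
    rename_i pos1 r1 st1
    intro st' hps
    have he : drainA r1 st' = drainA r1 st1 := by
      rw [drainA_eq_prod, drainA_eq_prod, hps]
    exact he ▸ EvN.eof h
  | close hlt hg =>
    rename_i pos1 r1 st1
    intro st' hps
    have he : drainA r1 st' = drainA r1 st1 := by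
      rw [drainA_eq_prod, drainA_eq_prod, hps]
    exact he ▸ EvN.close hlt hg
  | paren hlt hg e1 e2 ih1 ih2 =>
    intro st' hps
    exact EvN.paren hlt hg e1 (ih2 st' hps)
  | mul hlt hg e ih =>
    intro st' hps
    refine EvN.mul hlt hg (ih _ ?_)
    simp [hps]
  | plus hlt hg e ih =>
    intro st' hps
    exact EvN.plus hlt hg (ih st' hps)
  | digit hlt hg h1 h2 h3 h4 hd e ih =>
    intro st' hps
    exact EvN.digit hlt hg h1 h2 h3 h4 hd (ih st' hps)

-- forward simulation: A's run (plus suspended callers) is executed by B's flat loop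
theorem loopB_of_evN {cs : List Char} :
    ∀ (k n m : Nat) (pos r : Int) (st : List Int) (frames : List (Int × Int))
      (v p : Int) (out : Int × Int) (fuel : Nat),
      n + m = k →
      EvN cs n pos r st (v, p) →
      ResumeNB cs m frames v p out →
      (frames = [] ∨ pos ≤ (cs.length : Int)) →
      2 * ((cs.length : Int) - pos).toNat + frames.length + 1 ≤ fuel →
      loopB cs fuel pos r st.prod frames = some out := by
  intro k
  induction k using Nat.strong_induction_on with
  | _ k ih =>
    intro n m pos r st frames v p out fuel hk he hres hor hfuel
    obtain ⟨f, rfl⟩ : ∃ f, fuel = f + 1 := ⟨fuel - 1, by omega⟩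
    cases he with
    | eof h =>
      cases hres with
      | nil =>
        rw [loopB_succ, if_neg h]
        simp [drainA_eq_prod]
      | cons hev hprod hres' =>
        rename_i g m' t0 p0 st0 fs v' p'
        have hple : pos ≤ (cs.length : Int) := by
          rcases hor with h' | h'
          · exact absurd h' (by simp)
          · exact h'
        have hpe : pos = (cs.length : Int) := by omega
        rw [loopB_succ, if_neg h]
        have hlen : ((t0, p0) :: fs).length = fs.length + 1 := by simp
        have hrec := ih (g + m') (by omega) g m' (cs.length : Int)
          (t0 + drainA r st) st0 fs v' p' out f rfl hev hres' (Or.inr le_rfl)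
          (by omega)
        rw [hprod] at hrec
        rw [drainA_eq_prod] at hrec
        rw [hpe]
        exact hrec
    | close hlt hg =>
      cases hres with
      | nil =>
        rw [loopB_succ, if_pos hlt]
        simp [hg, drainA_eq_prod]
      | cons hev hprod hres' =>
        rename_i g m' t0 p0 st0 fs v' p'
        rw [loopB_succ, if_pos hlt]
        simp only [hg]
        simp only [reduceIte]
        have hlen : ((t0, p0) :: fs).length = fs.length + 1 := by simp
        have hrec := ih (g + m') (by omega) g m' (pos + 1)
          (t0 + drainA r st) st0 fs v' p' out f rfl hev hres' (Or.inr (by omega))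
          (by omega)
        rw [hprod] at hrec
        rw [drainA_eq_prod] at hrec
        exact hrec
    | paren hlt hg e1 e2 =>
      rename_i n1 n2 v1 p1
      rw [loopB_succ, if_pos hlt]
      simp only [hg]
      simp only [reduceIte]
      have hres2 : ResumeNB cs (n2 + m) ((r, st.prod) :: frames) v1 p1 out :=
        ResumeNB.cons e2 rfl hres
      have hlen : ((r, st.prod) :: frames).length = frames.length + 1 := by simp
      have hrec := ih (n1 + (n2 + m)) (by omega) n1 (n2 + m) (pos + 1) 0 [] _
        v1 p1 out f rfl e1 hres2 (Or.inr (by omega)) (by omega)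
      simpa using hrec
    | mul hlt hg e =>
      rename_i n'
      rw [loopB_succ, if_pos hlt]
      simp only [hg]
      simp only [reduceIte]
      have hrec := ih (n' + m) (by omega) n' m (pos + 1) 0 (st ++ [r]) frames
        v p out f rfl e hres (Or.inr (by omega)) (by omega)
      simpa [List.prod_append] using hrec
    | plus hlt hg e =>
      rename_i n'
      rw [loopB_succ, if_pos hlt]
      simp only [hg]
      simp only [reduceIte]
      exact ih (n' + m) (by omega) n' m (pos + 1) r st frames
        v p out f rfl e hres (Or.inr (by omega)) (by omega)
    | digit hlt hg hc1 hc2 hc3 hc4 hd e =>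
      rename_i c d n'
      rw [loopB_succ, if_pos hlt]
      simp only [hg]
      rw [if_neg hc1, if_neg hc2, if_neg hc3, if_neg hc4]
      simp only [hd]
      exact ih (n' + m) (by omega) n' m (pos + 1) (r + d) st frames
        v p out f rfl e hres (Or.inr (by omega)) (by omega)

-- reverse simulation: a successful run of B's loop decomposes into A's big-step runs
theorem evN_of_loopB {cs : List Char} :
    ∀ (fuel : Nat) (pos total prod : Int) (frames : List (Int × Int)) (out : Int × Int),
      loopB cs fuel pos total prod frames = some out →
      (frames = [] ∨ pos ≤ (cs.length : Int)) →
      ∀ st : List Int, st.prod = prod →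
        ∃ n m v p, EvN cs n pos total st (v, p) ∧ ResumeNB cs m frames v p out := by
  intro fuel
  induction fuel with
  | zero => intro pos total prod frames out h; simp [loopB_zero] at h
  | succ f ih =>
    intro pos total prod frames out h hor st hst
    rw [loopB_succ] at h
    split at h
    · -- pos < len
      rename_i hlt
      split at h
      · exact absurd h (by simp)
      · rename_i c hg
        split at h
        · -- ')'
          rename_i hc1
          subst hc1
          split at h
          · -- frames = []
            obtain rfl := Option.some.inj h
            have hv : drainA total st = prod * total := by rw [drainA_eq_prod, hst]
            refine ⟨1, 0, drainA total st, pos + 1, EvN.close hlt hg, ?_⟩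
            rw [← hv]
            exact ResumeNB.nil
          · -- frames = (t0, p0) :: fs
            rename_i t0 p0 fs
            obtain ⟨n1, m1, v1, p1x, e1, res1⟩ :=
              ih _ _ _ _ _ h (Or.inr (by omega)) [p0] (by simp)
            have hv : drainA total st = prod * total := by rw [drainA_eq_prod, hst]
            have e1' : EvN cs n1 (pos + 1) (t0 + drainA total st) [p0] (v1, p1x) := by
              rw [hv]; exact e1
            exact ⟨1, n1 + m1, drainA total st, pos + 1, EvN.close hlt hg,
              ResumeNB.cons e1' (by simp) res1⟩
        · rename_i hc1
          split at h
          · -- '('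
            rename_i hc2
            subst hc2
            obtain ⟨n1, m1, v1, p1, e1, res1⟩ :=
              ih _ _ _ _ _ h (Or.inr (by omega)) [] (by simp)
            cases res1 with
            | cons hev hprod res' =>
              rename_i g m' st0 v' p'
              have econt : EvN cs g p1 (total + v1) st (v', p') :=
                evN_stack hev st (by rw [hst, hprod])
              exact ⟨n1 + g + 1, m', v', p', EvN.paren hlt hg e1 econt, res'⟩
          · rename_i hc2
            split at h
            · -- '*'
              rename_i hc3
              subst hc3
              obtain ⟨n1, m1, v1, p1, e1, res1⟩ :=
                ih _ _ _ _ _ h (Or.inr (by omega)) (st ++ [total]) (by simp [hst])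
              exact ⟨n1 + 1, m1, v1, p1, EvN.mul hlt hg e1, res1⟩
            · rename_i hc3
              split at h
              · -- '+'
                rename_i hc4
                subst hc4
                obtain ⟨n1, m1, v1, p1, e1, res1⟩ :=
                  ih _ _ _ _ _ h (Or.inr (by omega)) st hst
                exact ⟨n1 + 1, m1, v1, p1, EvN.plus hlt hg e1, res1⟩
              · rename_i hc4
                split at h
                · exact absurd h (by simp)
                · rename_i d hd
                  obtain ⟨n1, m1, v1, p1, e1, res1⟩ :=
                    ih _ _ _ _ _ h (Or.inr (by omega)) st hst
                  exact ⟨n1 + 1, m1, v1, p1,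
                    EvN.digit hlt hg hc1 hc2 hc3 hc4 hd e1, res1⟩
    · -- EOF
      rename_i hge
      split at h
      · -- frames = []
        obtain rfl := Option.some.inj h
        have hv : drainA total st = prod * total := by rw [drainA_eq_prod, hst]
        refine ⟨1, 0, drainA total st, (cs.length : Int), EvN.eof hge, ?_⟩
        rw [← hv]
        exact ResumeNB.nil
      · -- frames = (t0, p0) :: fs
        rename_i t0 p0 fs
        have hple : pos ≤ (cs.length : Int) := by
          rcases hor with h' | h'
          · exact absurd h' (by simp)
          · exact h'
        have hpe : pos = (cs.length : Int) := by omega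
        obtain ⟨n1, m1, v1, p1x, e1, res1⟩ :=
          ih _ _ _ _ _ h (Or.inr hple) [p0] (by simp)
        have hv : drainA total st = prod * total := by rw [drainA_eq_prod, hst]
        have e1' : EvN cs n1 (cs.length : Int) (t0 + drainA total st) [p0] (v1, p1x) := by
          rw [hv]; exact hpe ▸ e1
        exact ⟨1, n1 + m1, drainA total st, (cs.length : Int), EvN.eof hge,
          ResumeNB.cons e1' (by simp) res1⟩

-- total agreement of the two ports (Pre_ is not needed for equality: on raising
-- inputs both ports yield none and fall back to the same default)
theorem evaluate_eq_alt (statement : String) (start_pos : Int) :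
    evaluate statement start_pos = evaluate_alt statement start_pos := by
  unfold evaluate evaluate_alt
  cases h : loopB statement.toList
      (2 * ((statement.toList.length : Int) - start_pos).toNat + 1) start_pos 0 1 [] with
  | some out =>
    obtain ⟨n, m, v, p, e, res⟩ :=
      evN_of_loopB _ start_pos 0 1 [] out h (Or.inl rfl) [] (by simp)
    cases res
    have hA := evalAgo_of_EvN e
      (((statement.toList.length : Int) - start_pos).toNat + 1) le_rfl
    simp only [hA, h, Option.getD_some]
  | none =>
    cases hA : evalAgo statement.toList
        (((statement.toList.length : Int) - start_pos).toNat + 1) start_pos 0 .ADD [] with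
    | none => simp only [hA, h]
    | some out =>
      obtain ⟨n, e⟩ := evN_of_evalAgo _ start_pos 0 [] out hA
      obtain ⟨v, p⟩ := out
      have hB := loopB_of_evN (n + 0) n 0 start_pos 0 [] [] v p (v, p)
        (2 * ((statement.toList.length : Int) - start_pos).toNat + 1) rfl e
        ResumeNB.nil (Or.inl rfl) (by simp)
      simp only [List.prod_nil] at hB
      rw [h] at hB
      exact absurd hB (by simp)

-- ===== VERDICT (by name: the statement is the Claim_ definition above) =====
theorem evaluate_spec : Claim_equal_evaluate := by
  intro statement start_pos _ _
  unfold Spec_evaluate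
  exact evaluate_eq_alt statement start_pos
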